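-- pv_equiv track=rewrite | github.com/guogenglin/icefinder-opt | script/single.py | MGE_reorder
-- ===== SOURCE A (Python) =====
-- def MGE_reorder(MGEdict):
--
--     new_MGEdict = {}
--     counters = {}
--
--     for key, value in MGEdict.items():
--         prefix = ''.join([c for c in key if not c.isdigit()])  # eg. 'IME'
--         counters[prefix] = counters.get(prefix, 0) + 1          # count
--         new_key = f"{prefix}{counters[prefix]}"                 # IME1、ICE2
--         new_MGEdict[new_key] = value
--
--     new_MGEdict
--
--     return new_MGEdict
-- ===== SOURCE B (Python) =====
-- def MGE_reorder(MGEdict):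
--     keyed = [(''.join(c for c in k if not c.isdigit()), v) for k, v in MGEdict.items()]
--     groups = {}
--     for i, (p, _) in enumerate(keyed):
--         groups.setdefault(p, []).append(i)
--     num = {}
--     for idxs in groups.values():
--         for j, i in enumerate(idxs, 1):
--             num[i] = j
--     return {f"{p}{num[i]}": v for i, (p, v) in enumerate(keyed)}
-- ===== Notes on version B (the rewrite author's own statement) =====
-- stated objective: alternative
-- what changed: B replaces A's single interleaved pass with a running counters dict by a staged group-then-scatter algorithm: one pass groups the original positions by digit-stripped prefix, a second pass numbers each group's positions 1..k by enumeration, and a final pass emits the renamed dict in the original order using the precomputed number table.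
import Mathlib
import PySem

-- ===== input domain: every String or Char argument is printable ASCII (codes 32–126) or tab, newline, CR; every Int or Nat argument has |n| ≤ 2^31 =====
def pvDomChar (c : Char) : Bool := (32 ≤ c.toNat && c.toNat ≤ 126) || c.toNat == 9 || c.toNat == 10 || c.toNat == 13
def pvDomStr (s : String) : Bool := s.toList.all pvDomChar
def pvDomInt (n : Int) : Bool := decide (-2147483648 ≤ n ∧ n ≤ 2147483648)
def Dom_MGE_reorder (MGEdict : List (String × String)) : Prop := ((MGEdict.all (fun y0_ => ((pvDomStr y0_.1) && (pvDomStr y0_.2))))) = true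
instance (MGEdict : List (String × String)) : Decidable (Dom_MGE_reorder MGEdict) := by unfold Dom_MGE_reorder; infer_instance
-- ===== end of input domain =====

-- B replaces A's single pass with a running counters dict by a staged group-then-scatter
-- algorithm (group positions by prefix, number each group, emit in original order);
-- objective: alternative decomposition, identical results.

-- shared helper: ''.join([c for c in key if not c.isdigit()])  (join of single chars = String.ofList of the filtered chars; exact)
def pvPrefix (key : String) : String :=
  String.ofList (key.toList.filter (fun c => !(PySem.Chars.isdigit c)))

-- ===== PORT A =====
def MGE_reorder (MGEdict : List (String × String)) : List (String × String) :=
  let st := MGEdict.foldl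
    (fun (st : PySem.Dict String String × PySem.Dict String Int) kv =>
      let pfx := pvPrefix kv.1
      let counters := st.2.insert pfx (st.2.getD pfx 0 + 1)
      let newKey := pfx ++ PySem.Int.toStr (counters.getD pfx 0)
      (st.1.insert newKey kv.2, counters))
    (PySem.Dict.empty, PySem.Dict.empty)
  st.1.items

-- ===== PORT B =====
-- num[i] in Source B: key i is provably always present, so getD with default 0 is the same lookup
def MGE_reorder_alt (MGEdict : List (String × String)) : List (String × String) :=
  let keyed := MGEdict.map (fun kv => (pvPrefix kv.1, kv.2))
  let groups := (PySem.List.enumerate keyed 0).foldl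
    (fun (g : PySem.Dict String (List Int)) ip => g.modify ip.2.1 [] (· ++ [ip.1]))
    PySem.Dict.empty
  let num := groups.values.foldl
    (fun (m : PySem.Dict Int Int) idxs =>
      (PySem.List.enumerate idxs 1).foldl (fun m ji => m.insert ji.2 ji.1) m)
    PySem.Dict.empty
  ((PySem.List.enumerate keyed 0).foldl
    (fun (d : PySem.Dict String String) ip =>
      d.insert (ip.2.1 ++ PySem.Int.toStr (num.getD ip.1 0)) ip.2.2)
    PySem.Dict.empty).items

-- ===== PRECONDITION & SPEC =====
def Spec_MGE_reorder (MGEdict : List (String × String)) (out : List (String × String)) : Prop := out = MGE_reorder_alt MGEdict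
instance (MGEdict : List (String × String)) (out : List (String × String)) : Decidable (Spec_MGE_reorder MGEdict out) := by unfold Spec_MGE_reorder; infer_instance

-- ===== CLAIM =====
def Claim_equal_MGE_reorder : Prop := ∀ (MGEdict : List (String × String)), Dom_MGE_reorder MGEdict → Spec_MGE_reorder MGEdict (MGE_reorder MGEdict)

-- ===== LEMMAS AND PROOFS =====

-- common abstraction: process `rest` given the multiset of prefixes already seen (`done`)
def pvBuild (done : List String) (rest : List (String × String))
    (d : PySem.Dict String String) : PySem.Dict String String :=
  match rest with
  | [] => d
  | kv :: rest =>
    pvBuild (done ++ [pvPrefix kv.1]) rest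
      (d.insert (pvPrefix kv.1 ++ PySem.Int.toStr ((done.count (pvPrefix kv.1) : Int) + 1)) kv.2)

theorem pvA_fold (rest : List (String × String)) :
    ∀ (done : List String) (d : PySem.Dict String String) (c : PySem.Dict String Int),
    (∀ p, c.getD p 0 = (done.count p : Int)) →
    (rest.foldl
      (fun (st : PySem.Dict String String × PySem.Dict String Int) kv =>
        (st.1.insert
          (pvPrefix kv.1 ++ PySem.Int.toStr
            ((st.2.insert (pvPrefix kv.1) (st.2.getD (pvPrefix kv.1) 0 + 1)).getD (pvPrefix kv.1) 0))
          kv.2,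
         st.2.insert (pvPrefix kv.1) (st.2.getD (pvPrefix kv.1) 0 + 1)))
      (d, c)).1 = pvBuild done rest d := by
  induction rest with
  | nil => intro done d c hc; simp [pvBuild]
  | cons kv rest ih =>
    intro done d c hc
    simp only [List.foldl_cons, pvBuild]
    rw [show (PySem.Dict.getD (c.insert (pvPrefix kv.1) (c.getD (pvPrefix kv.1) 0 + 1)) (pvPrefix kv.1) 0)
        = (done.count (pvPrefix kv.1) : Int) + 1 by
      rw [PySem.Dict.getD_insert_self, hc]]
    apply ih
    intro p
    rw [PySem.Dict.getD_insert, hc]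
    by_cases h : p = pvPrefix kv.1
    · subst h; simp
    · simp only [if_neg h, hc, List.count_append, List.count_singleton]
      simp [Ne.symm h]


theorem pvScatter_getD_of_no_write (pairs : List (Int × Int)) :
    ∀ (m : PySem.Dict Int Int) (i : Int), pairs.filter (fun ji => ji.2 == i) = [] →
    (pairs.foldl (fun m ji => m.insert ji.2 ji.1) m).getD i 0 = m.getD i 0 := by
  induction pairs with
  | nil => intro m i _; rfl
  | cons ji rest ih =>
    intro m i h
    simp only [List.filter_cons] at h
    by_cases hk : ji.2 = i
    · simp [hk] at h
    · simp only [beq_iff_eq, if_neg hk] at h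
      simp only [List.foldl_cons]
      rw [ih _ i h, PySem.Dict.getD_insert, if_neg (Ne.symm hk)]

theorem pvScatter_getD (pairs : List (Int × Int)) :
    ∀ (m : PySem.Dict Int Int) (i v : Int), pairs.filter (fun ji => ji.2 == i) = [(v, i)] →
    (pairs.foldl (fun m ji => m.insert ji.2 ji.1) m).getD i 0 = v := by
  induction pairs with
  | nil => intro m i v h; simp at h
  | cons ji rest ih =>
    intro m i v h
    simp only [List.filter_cons] at h
    by_cases hk : ji.2 = i
    · simp only [hk, beq_self_eq_true, if_pos] at h
      obtain ⟨h1, h2⟩ := List.cons_eq_cons.mp h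
      simp only [List.foldl_cons]
      rw [pvScatter_getD_of_no_write rest _ i h2, hk, PySem.Dict.getD_insert_self, h1]
    · simp only [beq_iff_eq, if_neg hk] at h
      simp only [List.foldl_cons]
      exact ih _ i v h

def pvGroups (keyed : List (String × String)) : PySem.Dict String (List Int) :=
  (PySem.List.enumerate keyed 0).foldl
    (fun (g : PySem.Dict String (List Int)) ip => g.modify ip.2.1 [] (· ++ [ip.1]))
    PySem.Dict.empty

theorem pvGroups_getD (keyed : List (String × String)) (p : String) :
    (pvGroups keyed).getD p []
      = ((PySem.List.enumerate keyed 0).filter (fun ip => ip.2.1 == p)).map (·.1) := by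
  have h := PySem.Dict.getD_foldl_modify_append
    ((PySem.List.enumerate keyed 0).map (fun ip => (ip.2.1, ip.1)))
    (PySem.Dict.empty) p
  rw [List.foldl_map] at h
  unfold pvGroups
  rw [h, List.filter_map, List.map_map]
  rfl

theorem pvGroups_keys (keyed : List (String × String)) :
    (pvGroups keyed).keys = PySem.Set.ofList (keyed.map (fun kv => kv.1)) := by
  unfold pvGroups
  rw [PySem.Dict.keys_foldl_modify_key (PySem.List.enumerate keyed 0)
    (fun ip => ip.2.1) [] (fun _ ip => (· ++ [ip.1])) PySem.Dict.empty]
  rw [PySem.Dict.keys_empty, PySem.Set.update_nil_left]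
  congr 1
  rw [show (fun (ip : Int × (String × String)) => ip.2.1) = (fun x => x.1) ∘ (fun (ip : Int × (String × String)) => ip.2) from rfl,
    ← List.map_map, PySem.List.map_snd_enumerate]

theorem pvGroups_nodup_keys (keyed : List (String × String)) :
    (pvGroups keyed).keys.Nodup := by
  rw [pvGroups_keys]; exact PySem.Set.nodup_ofList _

theorem pvEnum_filter (A B : List Int) (x : Int) (hA : ∀ a ∈ A, a ≠ x) (hB : ∀ b ∈ B, b ≠ x) :
    (PySem.List.enumerate (A ++ x :: B) 1).filter (fun ji => ji.2 == x)
      = [((A.length : Int) + 1, x)] := by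
  rw [PySem.List.enumerate_append, PySem.List.enumerate_cons, List.filter_append, List.filter_cons]
  have h1 : (PySem.List.enumerate A 1).filter (fun ji => ji.2 == x) = [] := by
    rw [List.filter_eq_nil_iff]
    intro p hp
    obtain ⟨k, hk, rfl⟩ := (PySem.List.mem_enumerate_iff A 1 p).mp hp
    simpa using hA _ (List.getElem_mem hk)
  have h2 : (PySem.List.enumerate B (1 + (A.length:Int) + 1)).filter (fun ji => ji.2 == x) = [] := by
    rw [List.filter_eq_nil_iff]
    intro p hp
    obtain ⟨k, hk, rfl⟩ := (PySem.List.mem_enumerate_iff _ _ p).mp hp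
    simpa using hB _ (List.getElem_mem hk)
  simp only [beq_self_eq_true, if_pos, h1, h2]
  simp [add_comm]

theorem pvFlat_single {α β : Type} (l : List α) (g : α → List β) (x : α) (y : β)
    (hnd : l.Nodup) (hx : x ∈ l) (hgx : g x = [y]) (hother : ∀ q ∈ l, q ≠ x → g q = []) :
    l.flatMap g = [y] := by
  induction l with
  | nil => simp at hx
  | cons a l ih =>
    rw [List.flatMap_cons]
    by_cases hax : a = x
    · subst hax
      have hnil : l.flatMap g = [] := by
        rw [List.flatMap_eq_nil_iff]
        intro q hq
        exact hother q (List.mem_cons_of_mem _ hq)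
          (fun h => (List.nodup_cons.mp hnd).1 (h ▸ hq))
      rw [hgx, hnil, List.append_nil]
    · rw [hother a List.mem_cons_self hax, List.nil_append]
      exact ih (List.nodup_cons.mp hnd).2
        (by rcases List.mem_cons.mp hx with h | h; exact absurd h.symm hax; exact h)
        (fun q hq => hother q (List.mem_cons_of_mem _ hq))

theorem pvCountP_enumerate {α : Type} (pred : α → Bool) (xs : List α) (s : Int) :
    List.countP (fun ip => pred ip.2) (PySem.List.enumerate xs s) = List.countP pred xs := by
  conv_rhs => rw [← PySem.List.map_snd_enumerate xs s]
  rw [List.countP_map]; rfl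

theorem pvIdxs_split (keyed : List (String × String)) (i : Nat) (hi : i < keyed.length) :
    ∃ A B : List Int,
      (pvGroups keyed).getD keyed[i].1 [] = A ++ (i:Int) :: B ∧
      (∀ a ∈ A, a ≠ (i:Int)) ∧ (∀ b ∈ B, b ≠ (i:Int)) ∧
      A.length = ((keyed.take i).map (fun kv => kv.1)).count keyed[i].1 := by
  have he : PySem.List.enumerate keyed 0
      = PySem.List.enumerate (keyed.take i) 0
        ++ ((i:Int), keyed[i]) :: PySem.List.enumerate (keyed.drop (i+1)) ((i:Int)+1) := by
    conv_lhs => rw [← List.take_append_drop i keyed, List.drop_eq_getElem_cons hi]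
    rw [PySem.List.enumerate_append, PySem.List.enumerate_cons]
    have : (keyed.take i).length = i := by simp [List.length_take, Nat.min_eq_left hi.le]
    rw [this]
    norm_num
  refine ⟨((PySem.List.enumerate (keyed.take i) 0).filter (fun ip => ip.2.1 == keyed[i].1)).map (·.1),
    ((PySem.List.enumerate (keyed.drop (i+1)) ((i:Int)+1)).filter (fun ip => ip.2.1 == keyed[i].1)).map (·.1),
    ?_, ?_, ?_, ?_⟩
  · rw [pvGroups_getD, he, List.filter_append, List.filter_cons]
    simp only [beq_self_eq_true, if_pos, List.map_append, List.map_cons]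
  · intro a ha
    obtain ⟨ip, hip, rfl⟩ := List.mem_map.mp ha
    obtain ⟨k, hk, rfl⟩ := (PySem.List.mem_enumerate_iff _ _ _).mp (List.mem_filter.mp hip).1
    have hki : k < i := lt_of_lt_of_le hk (by simp [List.length_take])
    simp only [zero_add]
    exact_mod_cast Nat.ne_of_lt hki
  · intro b hb
    obtain ⟨ip, hip, rfl⟩ := List.mem_map.mp hb
    obtain ⟨k, hk, rfl⟩ := (PySem.List.mem_enumerate_iff _ _ _).mp (List.mem_filter.mp hip).1
    omega
  · rw [List.length_map, ← List.countP_eq_length_filter, List.count_eq_countP, List.countP_map]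
    rw [pvCountP_enumerate (fun kv => kv.1 == keyed[i].1) (keyed.take i) 0]
    rfl

def pvNum (keyed : List (String × String)) : PySem.Dict Int Int :=
  (pvGroups keyed).values.foldl
    (fun (m : PySem.Dict Int Int) idxs =>
      (PySem.List.enumerate idxs 1).foldl (fun m ji => m.insert ji.2 ji.1) m)
    PySem.Dict.empty

theorem pvMem_getD_groups (keyed : List (String × String)) (q : String) (j : Int)
    (hj : j ∈ (pvGroups keyed).getD q []) :
    ∃ (k : Nat) (hk : k < keyed.length), j = (k:Int) ∧ keyed[k].1 = q := by
  rw [pvGroups_getD] at hj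
  obtain ⟨ip, hip, rfl⟩ := List.mem_map.mp hj
  obtain ⟨hmem, hpred⟩ := List.mem_filter.mp hip
  obtain ⟨k, hk, rfl⟩ := (PySem.List.mem_enumerate_iff _ _ _).mp hmem
  exact ⟨k, hk, by simp, by simpa using hpred⟩

theorem pvNum_getD (keyed : List (String × String)) (i : Nat) (hi : i < keyed.length) :
    (pvNum keyed).getD (i:Int) 0
      = (((keyed.take i).map (fun kv => kv.1)).count keyed[i].1 : Int) + 1 := by
  obtain ⟨A, B, hAB, hA, hB, hlen⟩ := pvIdxs_split keyed i hi
  unfold pvNum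
  rw [← List.foldl_flatMap]
  apply pvScatter_getD
  rw [List.filter_flatMap,
    PySem.Dict.values_eq_map_keys _ (pvGroups_nodup_keys keyed) [],
    List.flatMap_map]
  rw [← hlen]
  apply pvFlat_single _ _ keyed[i].1 ((A.length : Int) + 1, (i:Int)) (pvGroups_nodup_keys keyed)
  · rw [pvGroups_keys, PySem.Set.mem_ofList]
    exact List.mem_map.mpr ⟨keyed[i], List.getElem_mem hi, rfl⟩
  · rw [hAB]
    exact pvEnum_filter A B (i:Int) hA hB
  · intro q hq hqp
    rw [List.filter_eq_nil_iff]
    intro ji hji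
    obtain ⟨k, hk, rfl⟩ := (PySem.List.mem_enumerate_iff _ _ _).mp hji
    simp only [beq_iff_eq]
    intro hcontra
    obtain ⟨k', hk', hkk', hq'⟩ := pvMem_getD_groups keyed q _ (List.getElem_mem hk)
    rw [hcontra] at hkk'
    have : k' = i := by exact_mod_cast hkk'.symm
    subst this
    exact hqp (hq' ▸ rfl)

theorem pvEmit_aux (l : List (String × String)) :
    ∀ (n m : Nat) (d : PySem.Dict String String), l.length - m = n → m ≤ l.length →
    ((PySem.List.enumerate ((l.map (fun kv => (pvPrefix kv.1, kv.2))).drop m) (m:Int)).foldl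
      (fun (d : PySem.Dict String String) ip =>
        d.insert (ip.2.1 ++ PySem.Int.toStr ((pvNum (l.map (fun kv => (pvPrefix kv.1, kv.2)))).getD ip.1 0)) ip.2.2)
      d)
      = pvBuild (((l.map (fun kv => (pvPrefix kv.1, kv.2))).take m).map (fun kv => kv.1)) (l.drop m) d := by
  intro n
  induction n with
  | zero =>
    intro m d h0 hm
    have hm' : m = l.length := by omega
    subst hm'
    rw [List.drop_of_length_le (by simp), List.drop_of_length_le le_rfl]
    rfl
  | succ n ih =>
    intro m d h0 hm
    have hlt : m < l.length := by omega
    have hklen : m < (l.map (fun kv => (pvPrefix kv.1, kv.2))).length := by simpa using hlt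
    rw [List.drop_eq_getElem_cons hklen, PySem.List.enumerate_cons, List.foldl_cons,
      List.drop_eq_getElem_cons hlt, pvBuild]
    rw [pvNum_getD _ m hklen]
    have hget : (l.map (fun kv => (pvPrefix kv.1, kv.2)))[m] = (pvPrefix l[m].1, l[m].2) := by
      simp
    have hdone : (((l.map (fun kv => (pvPrefix kv.1, kv.2))).take m).map (fun kv => kv.1)) ++ [pvPrefix l[m].1]
        = (((l.map (fun kv => (pvPrefix kv.1, kv.2))).take (m+1)).map (fun kv => kv.1)) := by
      rw [List.take_add_one, List.map_append]
      congr 1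
      rw [List.getElem?_eq_getElem hklen, hget]
      rfl
    rw [hget]
    have := ih (m+1) (d.insert (pvPrefix l[m].1 ++ PySem.Int.toStr
        (((((l.map (fun kv => (pvPrefix kv.1, kv.2))).take m).map (fun kv => kv.1)).count (pvPrefix l[m].1) : Int) + 1)) l[m].2)
      (by omega) (by omega)
    rw [show ((m:Int) + 1) = (((m+1 : Nat)):Int) by push_cast; ring]
    rw [this, hdone]


-- ===== VERDICT =====
theorem MGE_reorder_spec : Claim_equal_MGE_reorder := by
  intro l _
  show MGE_reorder l = MGE_reorder_alt l
  have hA : MGE_reorder l = (pvBuild [] l PySem.Dict.empty).items :=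
    congrArg PySem.Dict.items (pvA_fold l [] PySem.Dict.empty PySem.Dict.empty (by simp))
  have hB : MGE_reorder_alt l = (pvBuild [] l PySem.Dict.empty).items := by
    show ((PySem.List.enumerate ((l.map (fun kv => (pvPrefix kv.1, kv.2))).drop 0) ((0:Nat):Int)).foldl
      (fun (d : PySem.Dict String String) ip =>
        d.insert (ip.2.1 ++ PySem.Int.toStr ((pvNum (l.map (fun kv => (pvPrefix kv.1, kv.2)))).getD ip.1 0)) ip.2.2)
      PySem.Dict.empty).items = _
    rw [pvEmit_aux l l.length 0 PySem.Dict.empty (by omega) (by omega)]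
    rfl
  rw [hA, hB]
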